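-- pv_equiv track=rewrite | github.com/sardort96/Naive-Bayes-Classifier-for-Sentiment-Analysis | NBClassifier.py | newbinary
-- ===== SOURCE A (Python) =====
-- def newbinary(rev):
-- 	review = list(rev)
--
-- 	new_list = []
-- 	deletelist = []
-- 	add_again = []
-- 	temp = [] # for one sentence at a time
--
-- 	while len(review) != 0:
-- 		for word in review:
-- 			deletelist.append(word)
-- 			if word in ['.', '!', ';']:
-- 				new_list.append(word)
-- 				break
-- 			if word not in temp:
-- 				new_list.append(word)
-- 				temp.append(word)
-- 			elif word not in add_again:
-- 				add_again.append(word)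
-- 			else:
-- 				new_list.append(word)
-- 				temp.append(word)
-- 				add_again.remove(word)
--
-- 		for word in deletelist:
-- 			review.remove(word)
-- 		deletelist.clear()
-- 		temp.clear()
--
-- 	return new_list
-- ===== SOURCE B (Python) =====
-- def newbinary(rev):
--     new_list = []
--     seen = set()      # words already emitted an odd-numbered occurrence in the current sentence
--     pending = set()   # words whose next repeat should be emitted (the even occurrence was skipped)
--     for word in rev:
--         if word in ('.', '!', ';'):
--             new_list.append(word)
--             seen = set()
--         elif word not in seen:
--             new_list.append(word)
--             seen.add(word)
--         elif word not in pending: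
--             pending.add(word)
--         else:
--             new_list.append(word)
--             pending.discard(word)
--     return new_list
-- ===== Notes on version B (the rewrite author's own statement) =====
-- stated objective: faster
-- what changed: Replaces A's quadratic while-loop that repeatedly rescans and list.remove()-consumes the review sentence by sentence (with linear list membership tests on temp/add_again) by a single linear pass over the words maintaining two sets: a per-sentence 'seen' set reset at each delimiter and an occurrence-parity 'pending' set kept across sentences exactly as A keeps add_again.
import Mathlib
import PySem

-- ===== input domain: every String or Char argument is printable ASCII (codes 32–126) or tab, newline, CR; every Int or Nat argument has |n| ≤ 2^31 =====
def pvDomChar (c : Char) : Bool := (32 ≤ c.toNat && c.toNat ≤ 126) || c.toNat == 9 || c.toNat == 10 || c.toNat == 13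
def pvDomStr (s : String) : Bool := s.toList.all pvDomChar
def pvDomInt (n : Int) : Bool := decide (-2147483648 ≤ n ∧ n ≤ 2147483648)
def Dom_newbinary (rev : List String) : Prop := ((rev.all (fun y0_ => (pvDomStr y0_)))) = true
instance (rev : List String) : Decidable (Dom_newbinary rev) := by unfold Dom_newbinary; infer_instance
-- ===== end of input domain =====

-- B replaces A's quadratic while/remove sentence-consumption by one linear pass over the
-- words with two sets (per-sentence 'seen', reset at delimiters, and the occurrence-parity
-- set 'pending', kept across sentences exactly as A keeps add_again); objective: faster.

-- ===== PORT A =====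
-- inner `for word in review` loop of A: given (review, temp, add_again) returns
-- (words appended to new_list, deletelist, temp, add_again); breaks at '.', '!', ';'.
def newbinaryInner : List String → List String → List String →
    List String × List String × List String × List String
  | [], temp, aa => ([], [], temp, aa)
  | w :: rest, temp, aa =>
    if w ∈ ["." , "!", ";"] then ([w], [w], temp, aa)
    else if w ∉ temp then
      let r := newbinaryInner rest (temp ++ [w]) aa
      (w :: r.1, w :: r.2.1, r.2.2.1, r.2.2.2)
    else if w ∉ aa then
      let r := newbinaryInner rest temp (aa ++ [w])
      (r.1, w :: r.2.1, r.2.2.1, r.2.2.2)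
    else
      -- new_list.append(word); temp.append(word); add_again.remove(word)
      -- (the remove always succeeds here since w ∈ aa; .getD is only a totality guard)
      let r := newbinaryInner rest (temp ++ [w]) ((PySem.List.remove? aa w).getD aa)
      (w :: r.1, w :: r.2.1, r.2.2.1, r.2.2.2)

-- `for word in deletelist: review.remove(word)` of A
def newbinaryDel (review dl : List String) : List String :=
  dl.foldl (fun r w => (PySem.List.remove? r w).getD r) review

-- the deletelist is exactly the traversed prefix, so removing it is dropping it
-- (needed by the port's own termination; cited in decreasing_by)
theorem newbinaryInner_del : ∀ (review temp aa : List String),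
    newbinaryDel review (newbinaryInner review temp aa).2.1
      = review.drop (newbinaryInner review temp aa).2.1.length := by
  intro review
  induction review with
  | nil => intro temp aa; rfl
  | cons w rest ih =>
    intro temp aa
    by_cases hd : w ∈ ["." , "!", ";"]
    · simp [newbinaryInner, hd, newbinaryDel, PySem.List.remove?_cons_self]
    · by_cases ht : w ∈ temp
      · by_cases ha : w ∈ aa
        · simpa [newbinaryInner, hd, ht, ha, newbinaryDel, PySem.List.remove?_cons_self]
            using ih (temp ++ [w]) ((PySem.List.remove? aa w).getD aa)
        · simpa [newbinaryInner, hd, ht, ha, newbinaryDel, PySem.List.remove?_cons_self]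
            using ih temp (aa ++ [w])
      · simpa [newbinaryInner, hd, ht, newbinaryDel, PySem.List.remove?_cons_self]
          using ih (temp ++ [w]) aa

theorem newbinaryInner_dl_ne {review temp aa : List String} (h : review ≠ []) :
    (newbinaryInner review temp aa).2.1 ≠ [] := by
  match review, h with
  | w :: rest, _ =>
    by_cases hd : w ∈ ["." , "!", ";"] <;> by_cases ht : w ∈ temp <;> by_cases ha : w ∈ aa <;>
      simp [newbinaryInner, hd, ht, ha]

-- the `while len(review) != 0` loop of A
def newbinaryLoop (review temp aa acc : List String) : List String :=
  if h : review = [] then acc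
  else
    let r := newbinaryInner review temp aa
    newbinaryLoop (newbinaryDel review r.2.1) [] r.2.2.2 (acc ++ r.1)
termination_by review.length
decreasing_by
  have hd := newbinaryInner_del review temp aa
  have hne := newbinaryInner_dl_ne (temp := temp) (aa := aa) h
  rw [hd, List.length_drop]
  have h1 : 0 < review.length := List.length_pos_of_ne_nil h
  have h2 : 0 < (newbinaryInner review temp aa).2.1.length := List.length_pos_of_ne_nil hne
  omega

def newbinary (rev : List String) : List String := newbinaryLoop rev [] [] []

-- ===== PORT B =====
-- one step of B's single pass; state = (new_list, seen, pending)
def newbinaryAltStep (st : List String × PySem.Set String × PySem.Set String) (w : String) :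
    List String × PySem.Set String × PySem.Set String :=
  if w ∈ ["." , "!", ";"] then (st.1 ++ [w], PySem.Set.empty, st.2.2)
  else if w ∉ st.2.1 then (st.1 ++ [w], PySem.Set.add st.2.1 w, st.2.2)
  else if w ∉ st.2.2 then (st.1, st.2.1, PySem.Set.add st.2.2 w)
  else (st.1 ++ [w], st.2.1, PySem.Set.discard st.2.2 w)

def newbinary_alt (rev : List String) : List String :=
  (rev.foldl newbinaryAltStep ([], PySem.Set.empty, PySem.Set.empty)).1

-- ===== PRECONDITION & SPEC =====
def Spec_newbinary (rev : List String) (out : List String) : Prop := out = newbinary_alt rev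
instance (rev : List String) (out : List String) : Decidable (Spec_newbinary rev out) := by unfold Spec_newbinary; infer_instance

-- ===== CLAIM (what is proved, stated in full; the proofs are below) =====
def Claim_equal_newbinary : Prop := ∀ (rev : List String), Dom_newbinary rev → Spec_newbinary rev (newbinary rev)

-- ===== LEMMAS AND PROOFS =====

-- on a duplicate-free list, Python's set.discard coincides with list.remove
theorem discard_eq_remove {aa : List String} (hn : aa.Nodup) (hm : w ∈ aa) :
    PySem.Set.discard aa w = (PySem.List.remove? aa w).getD aa := by
  rw [PySem.List.remove?_eq_some_erase aa w hm, Option.getD_some,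
    hn.erase_eq_filter w]
  rfl

-- one pass of A (the inner for-loop) is simulated by B's fold over the same words:
-- B's fold over `review` equals its fold over the unprocessed rest, started from the
-- output extended by A's appends and A's final add_again; seen is reset iff a delimiter
-- was hit (otherwise the rest is empty and seen no longer matters).
theorem inner_sim : ∀ (review temp aa acc : List String) (seen : PySem.Set String),
    (∀ w, w ∈ temp ↔ w ∈ seen) → aa.Nodup →
    ∃ rest s',
      review = (newbinaryInner review temp aa).2.1 ++ rest ∧
      review.foldl newbinaryAltStep (acc, seen, aa)
        = rest.foldl newbinaryAltStep
            (acc ++ (newbinaryInner review temp aa).1, s', (newbinaryInner review temp aa).2.2.2) ∧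
      (rest = [] ∨ s' = PySem.Set.empty) ∧
      (newbinaryInner review temp aa).2.2.2.Nodup := by
  intro review
  induction review with
  | nil =>
    intro temp aa acc seen _ hn
    exact ⟨[], seen, by simp [newbinaryInner], by simp [newbinaryInner], Or.inl rfl,
      by simpa [newbinaryInner] using hn⟩
  | cons w rest ih =>
    intro temp aa acc seen hts hn
    by_cases hd : w ∈ ["." , "!", ";"]
    · refine ⟨rest, PySem.Set.empty, by simp [newbinaryInner, hd], ?_, Or.inr rfl,
        by simpa [newbinaryInner, hd] using hn⟩
      simp [newbinaryInner, hd, List.foldl_cons, newbinaryAltStep]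
    · by_cases ht : w ∈ temp
      · have hseen : w ∈ seen := (hts w).1 ht
        by_cases ha : w ∈ aa
        · -- third occurrence branch: emit, remove from add_again / discard from pending
          have hstep : newbinaryAltStep (acc, seen, aa) w
              = (acc ++ [w], seen, (PySem.List.remove? aa w).getD aa) := by
            simp [newbinaryAltStep, hd, hseen, ha, discard_eq_remove hn ha]
          have hn' : ((PySem.List.remove? aa w).getD aa).Nodup := by
            rw [PySem.List.remove?_eq_some_erase aa w ha, Option.getD_some]
            exact hn.erase w
          have hts' : ∀ v, v ∈ temp ++ [w] ↔ v ∈ seen := by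
            intro v
            simp only [List.mem_append, List.mem_singleton, hts v]
            constructor
            · rintro (h | rfl)
              · exact h
              · exact hseen
            · exact Or.inl
          obtain ⟨r2, s', he, hf, hr, hnn⟩ :=
            ih (temp ++ [w]) ((PySem.List.remove? aa w).getD aa) (acc ++ [w]) seen hts' hn'
          refine ⟨r2, s', ?_, ?_, hr, ?_⟩
          · simp [newbinaryInner, hd, ht, ha]; exact he
          · simp only [List.foldl_cons, hstep, hf]
            simp [newbinaryInner, hd, ht, ha, List.append_assoc]
          · simpa [newbinaryInner, hd, ht, ha] using hnn
        · -- second occurrence: skipped, goes to add_again / pending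
          have hstep : newbinaryAltStep (acc, seen, aa) w = (acc, seen, aa ++ [w]) := by
            simp [newbinaryAltStep, hd, hseen, ha, PySem.Set.add, PySem.Set.contains]
          have hn' : (aa ++ [w]).Nodup := by
            simp [List.nodup_append, hn]
            intro a haa h
            exact ha (h ▸ haa)
          obtain ⟨r2, s', he, hf, hr, hnn⟩ := ih temp (aa ++ [w]) acc seen hts hn'
          refine ⟨r2, s', ?_, ?_, hr, ?_⟩
          · simp [newbinaryInner, hd, ht, ha]; exact he
          · simp only [List.foldl_cons, hstep, hf]
            simp [newbinaryInner, hd, ht, ha]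
          · simpa [newbinaryInner, hd, ht, ha] using hnn
      · -- first occurrence in the sentence: emit
        have hseen : w ∉ seen := fun h => ht ((hts w).2 h)
        have hstep : newbinaryAltStep (acc, seen, aa) w
            = (acc ++ [w], PySem.Set.add seen w, aa) := by
          simp [newbinaryAltStep, hd, hseen]
        have hts' : ∀ v, v ∈ temp ++ [w] ↔ v ∈ PySem.Set.add seen w := by
          intro v
          simp only [List.mem_append, List.mem_singleton, PySem.Set.mem_add, hts v]
        obtain ⟨r2, s', he, hf, hr, hnn⟩ :=
          ih (temp ++ [w]) aa (acc ++ [w]) (PySem.Set.add seen w) hts' hn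
        refine ⟨r2, s', ?_, ?_, hr, ?_⟩
        · simp [newbinaryInner, hd, ht]; exact he
        · simp only [List.foldl_cons, hstep, hf]
          simp [newbinaryInner, hd, ht, List.append_assoc]
        · simpa [newbinaryInner, hd, ht] using hnn

-- A's whole while-loop is simulated by B's single fold
theorem loop_sim : ∀ (n : ℕ) (review temp aa acc : List String) (seen : PySem.Set String),
    review.length ≤ n → (∀ w, w ∈ temp ↔ w ∈ seen) → aa.Nodup →
    newbinaryLoop review temp aa acc = (review.foldl newbinaryAltStep (acc, seen, aa)).1 := by
  intro n
  induction n with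
  | zero =>
    intro review temp aa acc seen hlen _ _
    have : review = [] := List.eq_nil_of_length_eq_zero (Nat.le_zero.mp hlen)
    subst this
    simp [newbinaryLoop]
  | succ n ih =>
    intro review temp aa acc seen hlen hts hn
    by_cases h : review = []
    · subst h; simp [newbinaryLoop]
    · obtain ⟨rest, s', he, hf, hr, hnn⟩ := inner_sim review temp aa acc seen hts hn
      have hdel : newbinaryDel review (newbinaryInner review temp aa).2.1 = rest := by
        have hdrop := newbinaryInner_del review temp aa
        revert he hdrop
        generalize (newbinaryInner review temp aa).2.1 = dl
        intro he hdrop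
        rw [hdrop, he, List.drop_left]
      rw [newbinaryLoop]
      simp only [h, dite_false, hdel, hf]
      rcases hr with hr | hr
      · subst hr
        simp [newbinaryLoop]
      · subst hr
        have hrest : rest.length ≤ n := by
          have hne := newbinaryInner_dl_ne (temp := temp) (aa := aa) h
          have : review.length = (newbinaryInner review temp aa).2.1.length + rest.length := by
            conv_lhs => rw [he]
            simp
          have h2 : 0 < (newbinaryInner review temp aa).2.1.length :=
            List.length_pos_of_ne_nil hne
          omega
        exact ih rest [] (newbinaryInner review temp aa).2.2.2
          (acc ++ (newbinaryInner review temp aa).1) PySem.Set.empty hrest (by simp) hnn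

-- ===== VERDICT (by name: the statement is the Claim_ definition above) =====
theorem newbinary_spec : Claim_equal_newbinary := by
  intro rev _
  show newbinary rev = newbinary_alt rev
  unfold newbinary newbinary_alt
  exact loop_sim rev.length rev [] [] [] PySem.Set.empty le_rfl (by simp) List.nodup_nil
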